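-- pv_equiv track=rewrite | github.com/skunk4z0/chat-log-distiller | scripts/chunker.py | grow_chunk_end
-- ===== SOURCE A (Python) =====
-- def extend_for_atomics(s: int, e: int, atomics: list[tuple[int, int]], n_lines: int) -> int:
--     """Smallest e' >= e such that [s, e') does not partially cut any atomic range."""
--     e_out = min(e, n_lines)
--     changed = True
--     while changed:
--         changed = False
--         for a, b in atomics:
--             if b <= s or a >= e_out:
--                 continue
--             if a >= s and b <= e_out:
--                 continue
--             e_out = min(max(e_out, b), n_lines)
--             changed = True
--     return e_out
--
-- def char_count(lines: list[str], s: int, e: int) -> int: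
--     return sum(len(lines[i]) for i in range(s, e))
--
-- def grow_chunk_end(
--     lines: list[str],
--     s: int,
--     max_chars: int,
--     atomics: list[tuple[int, int]],
--     n: int,
-- ) -> int:
--     """
--     Exclusive end line `e` (>= s): grow by lines until char_count(s, e) <= max_chars,
--     extending past max_chars only to close a partially touched atomic block.
--     """
--     e = s
--     if s >= n:
--         return n
--     while e < n:
--         cand = extend_for_atomics(s, e + 1, atomics, n)
--         cc = char_count(lines, s, cand)
--         if cc <= max_chars:
--             e = cand
--             continue
--         if e > s:
--             return e
--         return cand
--     return n
-- ===== SOURCE B (Python) =====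
-- def grow_chunk_end(
--     lines: list[str],
--     s: int,
--     max_chars: int,
--     atomics: list[tuple[int, int]],
--     n: int,
-- ) -> int:
--     """Single left-to-right pass with a running character total: an end e is
--     'valid' iff it does not fall strictly inside an atomic range; the answer is
--     the last valid end whose running total fits, else the first valid end.
--     The total only grows, so once it exceeds the budget and a first valid end
--     is known, no later end can matter and the scan stops."""
--     if s >= n:
--         return n
--     first = None
--     best = None
--     total = 0
--     for e in range(s + 1, n + 1):
--         total += len(lines[e - 1])
--         if all(not (a < e < b) for a, b in atomics):
--             if first is None:
--                 first = e
--             if total <= max_chars: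
--                 best = e
--         if total > max_chars and first is not None:
--             break
--     return best if best is not None else first
-- ===== Notes on version B (the rewrite author's own statement) =====
-- stated objective: alternative
-- what changed: B replaces A's repeated closure loop (extend_for_atomics fixpoint per step) and per-candidate char_count re-summation by one left-to-right pass with a running character total, classifying each end as valid (not strictly inside an atomic) and keeping the first valid end and the last valid end that fits, stopping once the total exceeds the budget.
-- outside the precondition, e.g. on grow_chunk_end(['aaa', 'b'], 0, 2, [(1, 5)], 2): A returns 1, B returns 1
import Mathlib
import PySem

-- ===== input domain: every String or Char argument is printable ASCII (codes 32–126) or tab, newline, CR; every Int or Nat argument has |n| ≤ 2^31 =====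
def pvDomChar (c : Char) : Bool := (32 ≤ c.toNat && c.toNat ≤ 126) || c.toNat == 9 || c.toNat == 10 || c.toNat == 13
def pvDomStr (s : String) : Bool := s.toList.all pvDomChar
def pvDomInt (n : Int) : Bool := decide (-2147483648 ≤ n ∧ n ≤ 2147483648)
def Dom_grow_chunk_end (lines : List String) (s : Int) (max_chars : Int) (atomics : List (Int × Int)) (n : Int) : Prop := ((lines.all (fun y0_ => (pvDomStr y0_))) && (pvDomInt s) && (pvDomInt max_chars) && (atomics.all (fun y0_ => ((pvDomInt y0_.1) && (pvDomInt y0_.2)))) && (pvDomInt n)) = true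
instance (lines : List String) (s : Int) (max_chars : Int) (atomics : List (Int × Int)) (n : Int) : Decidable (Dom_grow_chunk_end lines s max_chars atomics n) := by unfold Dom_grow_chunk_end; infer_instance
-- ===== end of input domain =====

-- B replaces A's per-step atomic-closure fixpoint loop and per-candidate char_count re-summation
-- by a single left-to-right pass with a running character total (objective: alternative).


-- ===== PORT A =====
-- len(lines[i]); under Pre_ the index is always in range, so the getD "" default is never used
def pvLineLen (lines : List String) (i : Int) : Int :=
  PySem.Str.len ((PySem.List.pyGet? lines i).getD "")

-- char_count: sum(len(lines[i]) for i in range(s, e))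
def pvCharCount (lines : List String) (s e : Int) : Int :=
  ((PySem.List.pyRange s e 1).map (fun i => pvLineLen lines i)).sum

-- one 'for a, b in atomics' pass of extend_for_atomics: state (e_out, changed)
def pvPass (s n : Int) (ats : List (Int × Int)) (st : Int × Bool) : Int × Bool :=
  match ats with
  | [] => st
  | ab :: rest =>
      pvPass s n rest
        (if ab.2 ≤ s ∨ st.1 ≤ ab.1 then st
         else if s ≤ ab.1 ∧ ab.2 ≤ st.1 then st
         else (min (max st.1 ab.2) n, true))

-- the 'while changed' loop; fuel: under Pre_ every changed pass strictly increases e_out ≤ n,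
-- so (n - e_out₀).toNat + 1 passes always suffice (outside Pre_ the Python loop can diverge)
def pvExtendLoop : Nat → Int → Int → List (Int × Int) → Int → Int
  | 0, e_out, _, _, _ => e_out
  | fuel + 1, e_out, s, ats, n =>
      let r := pvPass s n ats (e_out, false)
      if r.2 then pvExtendLoop fuel r.1 s ats n else r.1

def extend_for_atomics (s e : Int) (atomics : List (Int × Int)) (n_lines : Int) : Int :=
  pvExtendLoop ((n_lines - min e n_lines).toNat + 1) (min e n_lines) s atomics n_lines

-- the 'while e < n' loop of grow_chunk_end; fuel: each continuing step has cand ≥ e + 1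
def pvGrowLoop (lines : List String) (s max_chars : Int) (atomics : List (Int × Int)) (n : Int) :
    Nat → Int → Int
  | 0, _ => n
  | fuel + 1, e =>
      if e < n then
        let cand := extend_for_atomics s (e + 1) atomics n
        let cc := pvCharCount lines s cand
        if cc ≤ max_chars then pvGrowLoop lines s max_chars atomics n fuel cand
        else if e > s then e else cand
      else n

def grow_chunk_end (lines : List String) (s : Int) (max_chars : Int) (atomics : List (Int × Int)) (n : Int) : Int :=
  if s ≥ n then n
  else pvGrowLoop lines s max_chars atomics n ((n - s).toNat + 1) s

-- ===== PORT B =====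
-- all(not (a < e < b) for a, b in atomics)
def pvValidB (atomics : List (Int × Int)) (e : Int) : Bool :=
  atomics.all (fun ab => decide (¬ (ab.1 < e ∧ e < ab.2)))

-- loop body of B: state (first, best, total)
def pvStepB (lines : List String) (max_chars : Int) (atomics : List (Int × Int))
    (st : Option Int × Option Int × Int) (e : Int) : Option Int × Option Int × Int :=
  let total := st.2.2 + PySem.Str.len ((PySem.List.pyGet? lines (e - 1)).getD "")
  if pvValidB atomics e then
    ((match st.1 with | none => some e | some f => some f),
     (if total ≤ max_chars then some e else st.2.1),
     total)
  else (st.1, st.2.1, total)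

-- B's 'for e in range(s+1, n+1)' loop with its early 'break'
def pvLoopB (lines : List String) (max_chars : Int) (atomics : List (Int × Int)) :
    List Int → (Option Int × Option Int × Int) → Option Int × Option Int × Int
  | [], st => st
  | e :: rest, st =>
      let st' := pvStepB lines max_chars atomics st e
      if max_chars < st'.2.2 ∧ st'.1.isSome = true then st'
      else pvLoopB lines max_chars atomics rest st'

def grow_chunk_end_alt (lines : List String) (s : Int) (max_chars : Int) (atomics : List (Int × Int)) (n : Int) : Int :=
  if s ≥ n then n
  else
    let r := pvLoopB lines max_chars atomics (PySem.List.pyRange (s + 1) (n + 1) 1) (none, none, 0)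
    match r.2.1 with
    | some b => b
    | none => r.1.getD 0  -- Source B: 'return best if best is not None else first'; under Pre_ first is always set

-- ===== PRECONDITION & SPEC =====
-- Pre_ excludes (i) index ranges on which A's lines[i] raises IndexError or on which B scans past the
-- list (B raises IndexError there), and (ii) atomic ranges that reach past n or straddle s, on which
-- A's 'while changed' closure loop diverges whenever it engages such an atomic.
def Pre_grow_chunk_end (lines : List String) (s : Int) (max_chars : Int) (atomics : List (Int × Int)) (n : Int) : Prop :=
  s < n →
    ((-(lines.length : Int) ≤ s ∧ n ≤ (lines.length : Int)) ∧
     ∀ ab ∈ atomics, (ab.2 ≤ n ∧ (ab.2 ≤ s ∨ s ≤ ab.1)) ∨ n ≤ ab.1)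
instance (lines : List String) (s : Int) (max_chars : Int) (atomics : List (Int × Int)) (n : Int) : Decidable (Pre_grow_chunk_end lines s max_chars atomics n) := by unfold Pre_grow_chunk_end; infer_instance

def pvWitness_grow_chunk_end : List String × Int × Int × (List (Int × Int)) × Int :=
  (["ab", "c"], 0, 3, [(0, 2)], 2)

def Spec_grow_chunk_end (lines : List String) (s : Int) (max_chars : Int) (atomics : List (Int × Int)) (n : Int) (out : Int) : Prop := out = grow_chunk_end_alt lines s max_chars atomics n
instance (lines : List String) (s : Int) (max_chars : Int) (atomics : List (Int × Int)) (n : Int) (out : Int) : Decidable (Spec_grow_chunk_end lines s max_chars atomics n out) := by unfold Spec_grow_chunk_end; infer_instance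

-- ===== CLAIM (what is proved, stated in full; the proofs are below) =====
def Claim_equal_grow_chunk_end : Prop := ∀ (lines : List String) (s : Int) (max_chars : Int) (atomics : List (Int × Int)) (n : Int), Dom_grow_chunk_end lines s max_chars atomics n → Pre_grow_chunk_end lines s max_chars atomics n → Spec_grow_chunk_end lines s max_chars atomics n (grow_chunk_end lines s max_chars atomics n)

-- ===== LEMMAS AND PROOFS =====

-- the atomic precondition, as used by the loop lemmas
def pvPreAts (s n : Int) (ats : List (Int × Int)) : Prop :=
  ∀ ab ∈ ats, (ab.2 ≤ n ∧ (ab.2 ≤ s ∨ s ≤ ab.1)) ∨ n ≤ ab.1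

lemma pvValidB_iff (ats : List (Int × Int)) (e : Int) :
    pvValidB ats e = true ↔ ∀ ab ∈ ats, ¬ (ab.1 < e ∧ e < ab.2) := by
  simp only [pvValidB, List.all_eq_true, decide_eq_true_eq]

lemma pvValidB_n (s n : Int) (ats : List (Int × Int)) (hats : pvPreAts s n ats) :
    pvValidB ats n = true := by
  rw [pvValidB_iff]
  intro ab hab h
  rcases hats ab hab with ⟨hbn, _⟩ | han <;> omega

-- the least e' ≥ x with e' valid or e' = n (B's 'first valid end from x')
def pvNext (ats : List (Int × Int)) (n x : Int) : Int :=
  if h : n ≤ x then x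
  else if pvValidB ats x then x else pvNext ats n (x + 1)
termination_by (n - x).toNat
decreasing_by omega

lemma pvNext_ge (ats : List (Int × Int)) (n x : Int) : x ≤ pvNext ats n x := by
  fun_induction pvNext ats n x <;> omega

lemma pvNext_le (ats : List (Int × Int)) (n x : Int) : x ≤ n → pvNext ats n x ≤ n := by
  fun_induction pvNext ats n x <;> intro h <;> first | omega | (rename_i ih; exact ih (by omega))

lemma pvNext_valid (ats : List (Int × Int)) (n x : Int) (hvn : pvValidB ats n = true) :
    x ≤ n → pvValidB ats (pvNext ats n x) = true := by
  fun_induction pvNext ats n x with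
  | case1 x h => intro hx; have : x = n := le_antisymm hx h; rw [this]; exact hvn
  | case2 x h hv => intro _; exact hv
  | case3 x h hv ih =>
      intro hx
      have hxn : x < n := by omega
      by_cases hxe : x = n
      · omega
      · exact ih (by omega)

lemma pvNext_min (ats : List (Int × Int)) (n x y : Int) :
    x ≤ y → y < pvNext ats n x → pvValidB ats y = false := by
  fun_induction pvNext ats n x with
  | case1 x h => intro h1 h2; omega
  | case2 x h hv => intro h1 h2; omega
  | case3 x h hv ih =>
      intro h1 h2
      by_cases hxy : y = x
      · subst hxy; simpa using hv
      · exact ih (by omega) h2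

lemma pvNext_congr (ats : List (Int × Int)) (n x y : Int) :
    x ≤ y → y ≤ pvNext ats n x → pvNext ats n y = pvNext ats n x := by
  fun_induction pvNext ats n x with
  | case1 x h =>
      intro h1 h2
      have : y = x := by omega
      subst this
      rw [pvNext]; simp [h]
  | case2 x h hv =>
      intro h1 h2
      have : y = x := by omega
      subst this
      rw [pvNext]; simp [h, hv]
  | case3 x h hv ih =>
      intro h1 h2
      by_cases hxy : y = x
      · subst hxy; rw [pvNext]; simp [h, hv]
      · exact ih (by omega) h2

-- ---- pass lemmas ----

lemma pvPass_bounds (s n : Int) (ats : List (Int × Int)) :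
    ∀ st : Int × Bool, st.1 ≤ n → st.1 ≤ (pvPass s n ats st).1 ∧ (pvPass s n ats st).1 ≤ n := by
  induction ats with
  | nil => intro st h; simp [pvPass]; omega
  | cons ab rest ih =>
      intro st h
      simp only [pvPass]
      by_cases c1 : ab.2 ≤ s ∨ st.1 ≤ ab.1
      · rw [if_pos c1]; exact ih st h
      · rw [if_neg c1]
        by_cases c2 : s ≤ ab.1 ∧ ab.2 ≤ st.1
        · rw [if_pos c2]; exact ih st h
        · rw [if_neg c2]
          have h1 : st.1 ≤ min (max st.1 ab.2) n := by omega
          have h2 := ih (min (max st.1 ab.2) n, true) (by simp)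
          exact ⟨le_trans h1 h2.1, h2.2⟩

lemma pvPass_flag (s n : Int) (ats : List (Int × Int)) :
    ∀ st : Int × Bool, st.2 = true → (pvPass s n ats st).2 = true := by
  induction ats with
  | nil => intro st h; simpa [pvPass] using h
  | cons ab rest ih =>
      intro st h
      simp only [pvPass]
      by_cases c1 : ab.2 ≤ s ∨ st.1 ≤ ab.1
      · rw [if_pos c1]; exact ih st h
      · rw [if_neg c1]
        by_cases c2 : s ≤ ab.1 ∧ ab.2 ≤ st.1
        · rw [if_pos c2]; exact ih st h
        · rw [if_neg c2]; exact ih _ rfl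

lemma pvPass_fix (s n eo : Int) (hse : s < eo) (hen : eo ≤ n) :
    ∀ ats : List (Int × Int), pvPreAts s n ats → pvValidB ats eo = true →
      pvPass s n ats (eo, false) = (eo, false) := by
  intro ats
  induction ats with
  | nil => intro _ _; simp [pvPass]
  | cons ab rest ih =>
      intro hats hv
      have hv' := (pvValidB_iff _ _).mp hv
      have hab := hv' ab (by simp)
      have hpre := hats ab (by simp)
      have hrest : pvPass s n rest (eo, false) = (eo, false) :=
        ih (fun a h => hats a (by simp [h]))
           ((pvValidB_iff _ _).mpr (fun a h => hv' a (by simp [h])))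
      simp only [pvPass]
      by_cases c1 : ab.2 ≤ s ∨ ((eo, false) : Int × Bool).1 ≤ ab.1
      · rw [if_pos c1]; exact hrest
      · rw [if_neg c1]
        have c2 : s ≤ ab.1 ∧ ab.2 ≤ ((eo, false) : Int × Bool).1 := by
          simp only at c1 ⊢
          rcases hpre with ⟨hbn, hbs | hsa⟩ | han
          · omega
          · constructor
            · exact hsa
            · by_contra hh
              exact hab ⟨by omega, by omega⟩
          · omega
        rw [if_pos c2]; exact hrest

lemma pvPass_progress (s n : Int) (ats : List (Int × Int)) :
    ∀ st : Int × Bool, pvPreAts s n ats → s < st.1 → st.1 ≤ n →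
      (∃ ab ∈ ats, ab.1 < st.1 ∧ st.1 < ab.2) →
      st.1 + 1 ≤ (pvPass s n ats st).1 ∧ (pvPass s n ats st).2 = true := by
  induction ats with
  | nil => intro st _ _ _ hw; simp at hw
  | cons ab rest ih =>
      intro st hats hs hn hw
      have hpre := hats ab (by simp)
      simp only [pvPass]
      by_cases c1 : ab.2 ≤ s ∨ st.1 ≤ ab.1
      · have hw' : ∃ a ∈ rest, a.1 < st.1 ∧ st.1 < a.2 := by
          rcases hw with ⟨w, hw1, hw2⟩
          rcases List.mem_cons.mp hw1 with h | hw1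
          · subst h; exact absurd c1 (by omega)
          · exact ⟨w, hw1, hw2⟩
        rw [if_pos c1]
        exact ih st (fun a h => hats a (by simp [h])) hs hn hw'
      · rw [if_neg c1]
        by_cases c2 : s ≤ ab.1 ∧ ab.2 ≤ st.1
        · have hw' : ∃ a ∈ rest, a.1 < st.1 ∧ st.1 < a.2 := by
            rcases hw with ⟨w, hw1, hw2⟩
            rcases List.mem_cons.mp hw1 with h | hw1
            · subst h; exact absurd c2 (by omega)
            · exact ⟨w, hw1, hw2⟩
          rw [if_pos c2]
          exact ih st (fun a h => hats a (by simp [h])) hs hn hw'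
        · rw [if_neg c2]
          have hbn : ab.2 ≤ n ∧ st.1 < ab.2 := by
            rcases hpre with ⟨hbn, hbs | hsa⟩ | han <;> omega
          have hb := pvPass_bounds s n rest (min (max st.1 ab.2) n, true) (by simp)
          refine ⟨?_, pvPass_flag s n rest _ rfl⟩
          have h1 := hb.1
          simp only at h1
          omega

lemma pvPass_le_next (s n : Int) (ats : List (Int × Int)) :
    ∀ (st : Int × Bool) (N : Int), pvValidB ats N = true → st.1 ≤ N → N ≤ n →
      (pvPass s n ats st).1 ≤ N := by
  induction ats with
  | nil => intro st N _ h _; simpa [pvPass] using h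
  | cons ab rest ih =>
      intro st N hvN hsN hNn
      have hvN' := (pvValidB_iff _ _).mp hvN
      have hrest : pvValidB rest N = true :=
        (pvValidB_iff _ _).mpr (fun a h => hvN' a (by simp [h]))
      simp only [pvPass]
      by_cases c1 : ab.2 ≤ s ∨ st.1 ≤ ab.1
      · rw [if_pos c1]; exact ih st N hrest hsN hNn
      · rw [if_neg c1]
        by_cases c2 : s ≤ ab.1 ∧ ab.2 ≤ st.1
        · rw [if_pos c2]; exact ih st N hrest hsN hNn
        · rw [if_neg c2]
          have hab := hvN' ab (by simp)
          have hle : ((min (max st.1 ab.2) n, true) : Int × Bool).1 ≤ N := by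
            simp only
            by_cases hb : ab.2 ≤ N
            · omega
            · exfalso; exact hab ⟨by omega, by omega⟩
          exact ih _ N hrest hle hNn

-- ---- the closure loop computes pvNext ----

lemma pvExtendLoop_eq (s n : Int) (ats : List (Int × Int))
    (hats : pvPreAts s n ats) (hvn : pvValidB ats n = true) :
    ∀ (fuel : Nat) (eo : Int), s < eo → eo ≤ n → (n - eo).toNat < fuel →
      pvExtendLoop fuel eo s ats n = pvNext ats n eo := by
  intro fuel
  induction fuel with
  | zero => intro eo _ _ h; omega
  | succ f ih =>
      intro eo hse hen hf
      rw [pvExtendLoop]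
      by_cases hv : pvValidB ats eo = true
      · rw [pvPass_fix s n eo hse hen ats hats hv]
        simp only [Bool.false_eq_true, if_neg, not_false_iff]
        rw [pvNext]
        by_cases h : n ≤ eo <;> simp [h, hv]
      · have hlt : eo < n := by
          rcases lt_or_eq_of_le hen with h | h
          · exact h
          · rw [h] at hv; exact absurd hvn hv
        have hw : ∃ ab ∈ ats, ab.1 < eo ∧ eo < ab.2 := by
          by_contra hc
          push_neg at hc
          exact hv ((pvValidB_iff _ _).mpr (fun ab h => by have := hc ab h; omega))
        have hprog := pvPass_progress s n ats (eo, false) hats hse hen (by simpa using hw)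
        have hbnd := pvPass_bounds s n ats (eo, false) hen
        set r := pvPass s n ats (eo, false) with hr
        have hN : r.1 ≤ pvNext ats n (eo + 1) :=
          pvPass_le_next s n ats (eo, false) (pvNext ats n (eo + 1))
            (pvNext_valid ats n (eo + 1) hvn (by omega))
            (by simp; have := pvNext_ge ats n (eo + 1); omega)
            (pvNext_le ats n (eo + 1) (by omega))
        rw [hprog.2]
        simp only [if_pos]
        rw [ih r.1 (by omega) (by omega) (by omega)]
        rw [pvNext_congr ats n (eo + 1) r.1 (by omega) hN]
        have hne : ¬ n ≤ eo := by omega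
        conv_rhs => rw [pvNext]
        simp [hne, hv]

lemma pvExtend_eq (s n x : Int) (ats : List (Int × Int))
    (hats : pvPreAts s n ats) (hvn : pvValidB ats n = true) (h1 : s < x) (h2 : x ≤ n) :
    extend_for_atomics s x ats n = pvNext ats n x := by
  have hmin : min x n = x := by omega
  rw [extend_for_atomics, hmin]
  exact pvExtendLoop_eq s n ats hats hvn _ x h1 h2 (by omega)

-- ---- char-count lemmas ----

lemma pvCC_nonneg (lines : List String) (a b : Int) : 0 ≤ pvCharCount lines a b := by
  apply List.sum_nonneg
  intro x hx
  simp only [List.mem_map] at hx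
  obtain ⟨i, _, rfl⟩ := hx
  simp [pvLineLen, PySem.Str.len_eq]

lemma pvCC_split (lines : List String) (a m b : Int) (h1 : a ≤ m) (h2 : m ≤ b) :
    pvCharCount lines a b = pvCharCount lines a m + pvCharCount lines m b := by
  unfold pvCharCount
  rw [PySem.List.pyRange_one_append a m b h1 h2, List.map_append, List.sum_append]

lemma pvCC_single (lines : List String) (m : Int) :
    pvCharCount lines m (m + 1) = pvLineLen lines m := by
  unfold pvCharCount
  rw [PySem.List.pyRange_one_singleton]
  simp

lemma pvCC_mono (lines : List String) (a m b : Int) (h1 : a ≤ m) (h2 : m ≤ b) :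
    pvCharCount lines a m ≤ pvCharCount lines a b := by
  rw [pvCC_split lines a m b h1 h2]
  have := pvCC_nonneg lines m b
  omega

-- ---- B's single pass, characterised ----

def pvFits (lines : List String) (mc s : Int) (ats : List (Int × Int)) (e : Int) : Bool :=
  pvValidB ats e && decide (pvCharCount lines s e ≤ mc)

lemma pvFits_tail_empty (lines : List String) (mc s n x : Int) (ats : List (Int × Int))
    (hx : s ≤ x) (h : ¬ pvCharCount lines s x ≤ mc) :
    (PySem.List.pyRange x (n + 1) 1).filter (pvFits lines mc s ats) = [] := by
  rw [List.filter_eq_nil_iff]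
  intro y hy
  rw [PySem.List.mem_pyRange_one] at hy
  have := pvCC_mono lines s x y hx hy.1
  simp [pvFits]
  intro _
  omega

lemma pvLoopB_char (lines : List String) (mc s n : Int) (ats : List (Int × Int)) :
    ∀ (k : Nat) (x : Int) (f0 b0 : Option Int), s + 1 ≤ x → x ≤ n + 1 → (n + 1 - x).toNat = k →
      (pvLoopB lines mc ats (PySem.List.pyRange x (n + 1) 1) (f0, b0, pvCharCount lines s (x - 1))).1 =
        (match f0 with
         | some f => some f
         | none => ((PySem.List.pyRange x (n + 1) 1).filter (pvValidB ats)).head?) ∧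
      (pvLoopB lines mc ats (PySem.List.pyRange x (n + 1) 1) (f0, b0, pvCharCount lines s (x - 1))).2.1 =
        (match ((PySem.List.pyRange x (n + 1) 1).filter (pvFits lines mc s ats)).getLast? with
         | some b => some b
         | none => b0) := by
  intro k
  induction k with
  | zero =>
      intro x f0 b0 hx1 hx2 hk
      have hx : x = n + 1 := by omega
      subst hx
      rw [PySem.List.pyRange_one_eq_nil (by omega)]
      cases f0 <;> simp [pvLoopB]
  | succ k ih =>
      intro x f0 b0 hx1 hx2 hk
      have hxn : x ≤ n := by omega
      rw [PySem.List.pyRange_one_cons (by omega : x < n + 1)]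
      rw [pvLoopB]
      have hxx : (x + 1 - 1 : Int) = x := by ring
      have htot : pvCharCount lines s (x - 1) + PySem.Str.len ((PySem.List.pyGet? lines (x - 1)).getD "") = pvCharCount lines s x := by
        have hsp := pvCC_split lines s (x - 1) x (by omega) (by omega)
        have h2 : pvCharCount lines (x - 1) x = pvLineLen lines (x - 1) := by
          have h3 := pvCC_single lines (x - 1)
          have h4 : (x - 1) + 1 = x := by ring
          rw [h4] at h3
          exact h3
        rw [hsp, h2, pvLineLen]
      have hstep : pvStepB lines mc ats (f0, b0, pvCharCount lines s (x - 1)) x =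
          (if pvValidB ats x then
            ((match f0 with | none => some x | some f => some f),
             (if pvCharCount lines s x ≤ mc then some x else b0),
             pvCharCount lines s x)
          else (f0, b0, pvCharCount lines s x)) := by
        rw [pvStepB]
        simp only [htot]
      rw [hstep]
      clear hstep htot
      by_cases hvx : pvValidB ats x
      · rw [if_pos hvx]
        by_cases hfit : pvCharCount lines s x ≤ mc
        · -- fits: no break, recurse
          rw [if_pos hfit]
          have hnb : ¬ (mc < (((match f0 with | none => some x | some f => some f) : Option Int), some x, pvCharCount lines s x).2.2 ∧ (((match f0 with | none => some x | some f => some f) : Option Int), some x, pvCharCount lines s x).1.isSome = true) := by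
            simp only
            omega
          rw [if_neg hnb]
          clear hnb
          have hcc : pvCharCount lines s x = pvCharCount lines s ((x + 1) - 1) := by rw [hxx]
          rw [hcc]
          obtain ⟨ih1, ih2⟩ := ih (x + 1) (match f0 with | none => some x | some f => some f) (some x) (by omega) (by omega) (by omega)
          have hfx : pvFits lines mc s ats x = true := by simp [pvFits, hvx, hfit]
          constructor
          · rw [ih1]
            cases f0 with
            | some f => rfl
            | none =>
                simp only [List.filter_cons, hvx, if_pos]
                rw [List.head?_cons]
          · rw [ih2]
            simp only [List.filter_cons, hfx, if_pos]
            cases hL : (List.filter (pvFits lines mc s ats) (PySem.List.pyRange (x + 1) (n + 1) 1)).getLast? with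
            | some b =>
                have : (x :: List.filter (pvFits lines mc s ats) (PySem.List.pyRange (x + 1) (n + 1) 1)).getLast? = some b := by
                  cases hL' : List.filter (pvFits lines mc s ats) (PySem.List.pyRange (x + 1) (n + 1) 1) with
                  | nil => rw [hL'] at hL; simp at hL
                  | cons y ys => rw [hL'] at hL; rw [List.getLast?_cons, hL'] at *; simpa [List.getLast?_cons] using hL
                simp [this]
            | none =>
                have hnil : List.filter (pvFits lines mc s ats) (PySem.List.pyRange (x + 1) (n + 1) 1) = [] := by
                  cases hL' : List.filter (pvFits lines mc s ats) (PySem.List.pyRange (x + 1) (n + 1) 1) with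
                  | nil => rfl
                  | cons y ys => rw [hL'] at hL; simp [List.getLast?_cons] at hL
                simp [hnil]
        · -- valid but over budget: first is now set, so the loop breaks here
          rw [if_neg hfit]
          have hfx : pvFits lines mc s ats x = false := by simp [pvFits, hvx, hfit]
          have hrest : List.filter (pvFits lines mc s ats) (PySem.List.pyRange (x + 1) (n + 1) 1) = [] := by
            apply pvFits_tail_empty lines mc s n (x + 1) ats (by omega)
            have := pvCC_mono lines s x (x + 1) (by omega) (by omega)
            omega
          have hbr : (mc < (((match f0 with | none => some x | some f => some f) : Option Int), b0, pvCharCount lines s x).2.2 ∧ (((match f0 with | none => some x | some f => some f) : Option Int), b0, pvCharCount lines s x).1.isSome = true) := by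
            constructor
            · simpa using (by omega : mc < pvCharCount lines s x)
            · cases f0 <;> simp
          rw [if_pos hbr]
          constructor
          · cases f0 with
            | some f => rfl
            | none =>
                simp only [List.filter_cons, hvx, if_pos]
                rw [List.head?_cons]
          · simp only [List.filter_cons, hfx, Bool.false_eq_true, if_neg, not_false_iff, hrest]
            simp
      · rw [if_neg hvx]
        have hfx : pvFits lines mc s ats x = false := by simp [pvFits, hvx]
        by_cases hbr : (mc < ((f0, b0, pvCharCount lines s x) : Option Int × Option Int × Int).2.2 ∧ ((f0, b0, pvCharCount lines s x) : Option Int × Option Int × Int).1.isSome = true)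
        · -- over budget with first already set: break
          rw [if_pos hbr]
          obtain ⟨hb1, hb2⟩ := hbr
          simp only at hb1 hb2
          have hrest : List.filter (pvFits lines mc s ats) (PySem.List.pyRange (x + 1) (n + 1) 1) = [] := by
            apply pvFits_tail_empty lines mc s n (x + 1) ats (by omega)
            have := pvCC_mono lines s x (x + 1) (by omega) (by omega)
            omega
          constructor
          · cases f0 with
            | some f => rfl
            | none => simp at hb2
          · simp only [List.filter_cons, hfx, Bool.false_eq_true, if_neg, not_false_iff, hrest]
            simp
        · rw [if_neg hbr]
          have hcc : pvCharCount lines s x = pvCharCount lines s ((x + 1) - 1) := by rw [hxx]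
          rw [hcc]
          obtain ⟨ih1, ih2⟩ := ih (x + 1) f0 b0 (by omega) (by omega) (by omega)
          constructor
          · rw [ih1]
            simp only [List.filter_cons, hvx, Bool.false_eq_true, if_neg, not_false_iff]
          · rw [ih2]
            simp only [List.filter_cons, hfx, Bool.false_eq_true, if_neg, not_false_iff]

-- ---- A's outer loop, characterised against the same filters ----

lemma pvGrowLoop_eq (lines : List String) (s mc n : Int) (ats : List (Int × Int))
    (hats : pvPreAts s n ats) (hvn : pvValidB ats n = true) (hsn : s < n) :
    ∀ (fuel : Nat) (e : Int), s ≤ e → e ≤ n → (n - e).toNat < fuel →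
      (e = s ∨ (pvValidB ats e = true ∧ pvCharCount lines s e ≤ mc ∧ s < e)) →
      pvGrowLoop lines s mc ats n fuel e =
        (match ((PySem.List.pyRange (e + 1) (n + 1) 1).filter (pvFits lines mc s ats)).getLast? with
         | some b => b
         | none => if e = s then pvNext ats n (s + 1) else e) := by
  intro fuel
  induction fuel with
  | zero => intro e _ _ h; omega
  | succ f ih =>
      intro e hse hen hf hinv
      rw [pvGrowLoop]
      by_cases he : e < n
      · simp only [he, if_pos]
        have hcand := pvExtend_eq s n (e + 1) ats hats hvn (by omega) (by omega)
        set N := pvNext ats n (e + 1) with hN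
        have hNge : e + 1 ≤ N := pvNext_ge ats n (e + 1)
        have hNle : N ≤ n := pvNext_le ats n (e + 1) (by omega)
        have hNv : pvValidB ats N = true := pvNext_valid ats n (e + 1) hvn (by omega)
        rw [hcand]
        by_cases hcc : pvCharCount lines s N ≤ mc
        · simp only [hcc, if_pos]
          rw [ih N (by omega) hNle (by omega) (Or.inr ⟨hNv, hcc, by omega⟩)]
          -- split the range (e, n] at N
          have hsplit : PySem.List.pyRange (e + 1) (n + 1) 1 =
              PySem.List.pyRange (e + 1) (N + 1) 1 ++ PySem.List.pyRange (N + 1) (n + 1) 1 :=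
            PySem.List.pyRange_one_append _ _ _ (by omega) (by omega)
          have hfront : (PySem.List.pyRange (e + 1) (N + 1) 1).filter (pvFits lines mc s ats) = [N] := by
            rw [PySem.List.pyRange_one_succ_right (by omega : e + 1 ≤ N)]
            rw [List.filter_append]
            have h1 : (PySem.List.pyRange (e + 1) N 1).filter (pvFits lines mc s ats) = [] := by
              rw [List.filter_eq_nil_iff]
              intro y hy
              rw [PySem.List.mem_pyRange_one] at hy
              have := pvNext_min ats n (e + 1) y (by omega) (by omega)
              simp [pvFits, this]
            have h2 : List.filter (pvFits lines mc s ats) [N] = [N] := by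
              simp [pvFits, hNv, hcc]
            rw [h1, h2, List.nil_append]
          rw [hsplit, List.filter_append, hfront]
          rw [List.getLast?_append]
          cases hL : ((PySem.List.pyRange (N + 1) (n + 1) 1).filter (pvFits lines mc s ats)).getLast? with
          | some b => simp
          | none =>
              have hNs : ¬ N = s := by omega
              simp [hNs]
        · rw [if_neg hcc]
          -- nothing beyond e fits: everything in (e, N) is invalid, everything ≥ N is too big
          have hempty : (PySem.List.pyRange (e + 1) (n + 1) 1).filter (pvFits lines mc s ats) = [] := by
            rw [List.filter_eq_nil_iff]
            intro y hy
            rw [PySem.List.mem_pyRange_one] at hy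
            by_cases hyN : y < N
            · have := pvNext_min ats n (e + 1) y (by omega) (by omega)
              simp [pvFits, this]
            · have hmono := pvCC_mono lines s N y (by omega) (by omega)
              simp [pvFits]
              intro _
              omega
          rw [hempty]
          simp only [List.getLast?_nil]
          rcases hinv with rfl | ⟨_, _, hgt⟩
          · simp [hN]
          · have h1 : ¬ e = s := by omega
            simp [h1, hgt]
      · have hen' : e = n := by omega
        rw [if_neg he]
        rw [PySem.List.pyRange_one_eq_nil (by omega)]
        have hns : ¬ e = s := by omega
        simp only [List.filter_nil, List.getLast?_nil]
        simp [hns]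
        omega

-- first valid end from s + 1 is the head of B's valid filter
lemma pvFirst_eq (s n : Int) (ats : List (Int × Int))
    (hats : pvPreAts s n ats) (hvn : pvValidB ats n = true) (hsn : s < n) :
    ((PySem.List.pyRange (s + 1) (n + 1) 1).filter (pvValidB ats)).head? =
      some (pvNext ats n (s + 1)) := by
  set N := pvNext ats n (s + 1) with hN
  have hNge : s + 1 ≤ N := pvNext_ge ats n (s + 1)
  have hNle : N ≤ n := pvNext_le ats n (s + 1) (by omega)
  have hNv : pvValidB ats N = true := pvNext_valid ats n (s + 1) hvn (by omega)
  have hsplit : PySem.List.pyRange (s + 1) (n + 1) 1 =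
      PySem.List.pyRange (s + 1) N 1 ++ PySem.List.pyRange N (n + 1) 1 :=
    PySem.List.pyRange_one_append _ _ _ (by omega) (by omega)
  have h1 : (PySem.List.pyRange (s + 1) N 1).filter (pvValidB ats) = [] := by
    rw [List.filter_eq_nil_iff]
    intro y hy
    rw [PySem.List.mem_pyRange_one] at hy
    have := pvNext_min ats n (s + 1) y (by omega) (by omega)
    simp [this]
  rw [hsplit, List.filter_append, h1, List.nil_append]
  rw [PySem.List.pyRange_one_cons (by omega : N < n + 1)]
  simp [hNv]

-- ===== VERDICT (by name: the statement is the Claim_ definition above) =====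
theorem grow_chunk_end_spec : Claim_equal_grow_chunk_end := by
  intro lines s mc ats n _ hpre
  unfold Spec_grow_chunk_end
  by_cases hsn : s ≥ n
  · unfold grow_chunk_end grow_chunk_end_alt
    simp [hsn]
  · have hsn' : s < n := by omega
    obtain ⟨_, hats⟩ := hpre hsn'
    have hvn : pvValidB ats n = true := pvValidB_n s n ats hats
    unfold grow_chunk_end grow_chunk_end_alt
    simp only [hsn, if_neg, not_false_iff]
    rw [pvGrowLoop_eq lines s mc n ats hats hvn hsn' _ s (le_refl s) (by omega) (by omega) (Or.inl rfl)]
    have hcc0 : (0 : Int) = pvCharCount lines s ((s + 1) - 1) := by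
      have : (s + 1 - 1 : Int) = s := by ring
      rw [this]
      unfold pvCharCount
      rw [PySem.List.pyRange_one_eq_nil (by omega)]
      simp
    rw [hcc0]
    obtain ⟨h1, h2⟩ := pvLoopB_char lines mc s n ats ((n + 1 - (s + 1)).toNat) (s + 1) none none (le_refl _) (by omega) rfl
    rw [h1, h2]
    cases hL : ((PySem.List.pyRange (s + 1) (n + 1) 1).filter (pvFits lines mc s ats)).getLast? with
    | some b => simp
    | none =>
        simp only
        rw [pvFirst_eq s n ats hats hvn hsn']
        simp
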